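-- pv_equiv track=rewrite | github.com/RexYuan/Saria | code/poset_cover.py | rm_trans_closure
-- ===== SOURCE A (Python) =====
-- def rm_trans_closure(uni, rs):
--     crels = set()
--     for x,y in rs:
--         cover = True
--         for z in uni:
--             if (x,z) in rs and (z,y) in rs:
--                 cover = False
--         if cover:
--             crels.add( (x,y) )
--     return crels
-- ===== SOURCE B (Python) =====
-- def rm_trans_closure(uni, rs):
--     # Index-and-join: for each middle vertex z, mark every edge (x,y) with
--     # x -> z -> y as redundant; keep the edges of rs that were never marked.
--     redundant = set()
--     for z in uni:
--         preds = [x for (x, w) in rs if w == z]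
--         succs = [y for (w, y) in rs if w == z]
--         for x in preds:
--             for y in succs:
--                 if (x, y) in rs:
--                     redundant.add((x, y))
--     return {e for e in rs if e not in redundant}
-- ===== Notes on version B (the rewrite author's own statement) =====
-- stated objective: alternative
-- what changed: Replaces A's per-edge scan of uni (testing each (x,z),(z,y) pair against rs) with a join over middle vertices: for each z it collects predecessors and successors of z once and marks the composed edges redundant, then filters rs against that set.
import Mathlib
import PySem

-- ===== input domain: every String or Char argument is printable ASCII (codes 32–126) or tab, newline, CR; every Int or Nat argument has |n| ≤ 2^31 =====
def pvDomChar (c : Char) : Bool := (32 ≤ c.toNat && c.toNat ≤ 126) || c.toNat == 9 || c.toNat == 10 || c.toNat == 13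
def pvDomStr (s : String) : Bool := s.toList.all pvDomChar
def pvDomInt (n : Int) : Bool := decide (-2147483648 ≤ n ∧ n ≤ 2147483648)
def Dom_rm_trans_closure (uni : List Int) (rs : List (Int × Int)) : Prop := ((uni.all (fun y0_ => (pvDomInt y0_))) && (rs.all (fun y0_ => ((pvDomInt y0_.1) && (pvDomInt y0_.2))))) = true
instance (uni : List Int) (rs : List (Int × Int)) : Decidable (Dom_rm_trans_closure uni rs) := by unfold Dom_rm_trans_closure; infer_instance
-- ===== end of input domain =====

-- B replaces A's per-edge scan of uni with a join over middle vertices (alternative decomposition; return value only).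
-- ===== PORT A =====
def rm_trans_closure (uni : List Int) (rs : List (Int × Int)) : List (Int × Int) :=
  rs.foldl (fun crels xy =>
    let cover := uni.foldl (fun cover z =>
      if rs.contains (xy.1, z) && rs.contains (z, xy.2) then false else cover) true
    if cover then PySem.Set.add crels xy else crels) PySem.Set.empty

-- ===== PORT B =====
def rm_trans_closure_alt (uni : List Int) (rs : List (Int × Int)) : List (Int × Int) :=
  let redundant : PySem.Set (Int × Int) := uni.foldl (fun red z =>
    let preds := (rs.filter (fun p => p.2 == z)).map (·.1)
    let succs := (rs.filter (fun p => p.1 == z)).map (·.2)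
    preds.foldl (fun red x =>
      succs.foldl (fun red y =>
        if rs.contains (x, y) then PySem.Set.add red (x, y) else red) red) red)
    PySem.Set.empty
  rs.foldl (fun out e =>
    if !(PySem.Set.contains redundant e) then PySem.Set.add out e else out) PySem.Set.empty

-- ===== PRECONDITION & SPEC =====
def Spec_rm_trans_closure (uni : List Int) (rs : List (Int × Int)) (out : List (Int × Int)) : Prop := out = rm_trans_closure_alt uni rs
instance (uni : List Int) (rs : List (Int × Int)) (out : List (Int × Int)) : Decidable (Spec_rm_trans_closure uni rs out) := by unfold Spec_rm_trans_closure; infer_instance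

-- ===== CLAIM (what is proved, stated in full; the proofs are below) =====
def Claim_equal_rm_trans_closure : Prop := ∀ (uni : List Int) (rs : List (Int × Int)), Dom_rm_trans_closure uni rs → Spec_rm_trans_closure uni rs (rm_trans_closure uni rs)


-- ===== LEMMAS AND PROOFS =====
-- A's inner loop over uni: the running flag ends false iff some z triggers.
theorem pv_cover_fold (uni : List Int) (f : Int → Bool) (b : Bool) :
    uni.foldl (fun c z => if f z then false else c) b = (b && !uni.any f) := by
  induction uni generalizing b with
  | nil => simp
  | cons z zs ih =>
      rw [List.foldl_cons, List.any_cons]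
      by_cases h : f z = true
      · rw [if_pos h, ih]; simp [h]
      · rw [if_neg h, ih]; simp [h]

-- membership in B's innermost fold (over successors of a fixed x)
theorem pv_succs_fold_mem (rs : List (Int × Int)) (x : Int) (succs : List Int)
    (red : List (Int × Int)) (q : Int × Int) :
    q ∈ succs.foldl (fun r y =>
        if rs.contains (x, y) then PySem.Set.add r (x, y) else r) red ↔
      q ∈ red ∨ ∃ y ∈ succs, (x, y) ∈ rs ∧ q = (x, y) := by
  induction succs generalizing red with
  | nil => simp
  | cons y ys ih =>
      rw [List.foldl_cons, ih]
      by_cases h : (x, y) ∈ rs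
      · simp only [List.contains_eq_mem, h, decide_true, if_true, PySem.Set.mem_add,
          List.mem_cons]
        constructor
        · rintro ((hq | hq) | ⟨y', hy', hmem, hq⟩)
          · exact Or.inl hq
          · exact Or.inr ⟨y, Or.inl rfl, h, hq⟩
          · exact Or.inr ⟨y', Or.inr hy', hmem, hq⟩
        · rintro (hq | ⟨y', (rfl | hy'), hmem, hq⟩)
          · exact Or.inl (Or.inl hq)
          · exact Or.inl (Or.inr hq)
          · exact Or.inr ⟨y', hy', hmem, hq⟩
      · simp only [List.contains_eq_mem, h, decide_false, List.mem_cons]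
        constructor
        · rintro (hq | ⟨y', hy', hmem, hq⟩)
          · exact Or.inl hq
          · exact Or.inr ⟨y', Or.inr hy', hmem, hq⟩
        · rintro (hq | ⟨y', (rfl | hy'), hmem, hq⟩)
          · exact Or.inl hq
          · exact absurd hmem h
          · exact Or.inr ⟨y', hy', hmem, hq⟩

-- membership in B's middle fold (over predecessors of z)
theorem pv_preds_fold_mem (rs : List (Int × Int)) (succs : List Int) (preds : List Int)
    (red : List (Int × Int)) (q : Int × Int) :
    q ∈ preds.foldl (fun r x =>
        succs.foldl (fun r y =>
          if rs.contains (x, y) then PySem.Set.add r (x, y) else r) r) red ↔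
      q ∈ red ∨ ∃ x ∈ preds, ∃ y ∈ succs, (x, y) ∈ rs ∧ q = (x, y) := by
  induction preds generalizing red with
  | nil => simp
  | cons x xs ih =>
      simp only [List.foldl_cons]
      rw [ih, pv_succs_fold_mem]
      simp only [List.mem_cons]
      constructor
      · rintro ((hq | ⟨y', hy', hmem, hq⟩) | ⟨x', hx', hrest⟩)
        · exact Or.inl hq
        · exact Or.inr ⟨x, Or.inl rfl, y', hy', hmem, hq⟩
        · exact Or.inr ⟨x', Or.inr hx', hrest⟩
      · rintro (hq | ⟨x', (rfl | hx'), hrest⟩)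
        · exact Or.inl (Or.inl hq)
        · exact Or.inl (Or.inr hrest)
        · exact Or.inr ⟨x', hx', hrest⟩

-- the inner double fold for one middle vertex z marks exactly the edges composed through z
theorem pv_join_z (rs : List (Int × Int)) (z : Int) (q : Int × Int) :
    (∃ x ∈ (rs.filter (fun p => p.2 == z)).map (·.1),
       ∃ y ∈ (rs.filter (fun p => p.1 == z)).map (·.2), (x, y) ∈ rs ∧ q = (x, y)) ↔
      (q.1, z) ∈ rs ∧ (z, q.2) ∈ rs ∧ q ∈ rs := by
  simp only [List.mem_map, List.mem_filter, beq_iff_eq]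
  constructor
  · rintro ⟨x, ⟨p, ⟨hp, hpz⟩, hpx⟩, y, ⟨p', ⟨hp', hpz'⟩, hpy⟩, hmem, rfl⟩
    refine ⟨?_, ?_, hmem⟩
    · have : p = (x, z) := by
        cases p; simp_all
      rw [← this]; exact hp
    · have : p' = (z, y) := by
        cases p'; simp_all
      rw [← this]; exact hp'
  · rintro ⟨h1, h2, hq⟩
    exact ⟨q.1, ⟨(q.1, z), ⟨h1, rfl⟩, rfl⟩, q.2, ⟨(z, q.2), ⟨h2, rfl⟩, rfl⟩, by simpa using hq,
      rfl⟩

-- membership in B's full `redundant` set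
theorem pv_redundant_mem (uni : List Int) (rs : List (Int × Int))
    (red : List (Int × Int)) (q : Int × Int) :
    q ∈ uni.foldl (fun red z =>
        ((rs.filter (fun p => p.2 == z)).map (·.1)).foldl (fun red x =>
          ((rs.filter (fun p => p.1 == z)).map (·.2)).foldl (fun red y =>
            if rs.contains (x, y) then PySem.Set.add red (x, y) else red) red) red)
      red ↔
      q ∈ red ∨ ∃ z ∈ uni, (q.1, z) ∈ rs ∧ (z, q.2) ∈ rs ∧ q ∈ rs := by
  induction uni generalizing red with
  | nil => simp
  | cons z zs ih =>
      rw [List.foldl_cons, ih, pv_preds_fold_mem, pv_join_z]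
      simp only [List.mem_cons]
      constructor
      · rintro ((hq | hz) | ⟨z', hz', hrest⟩)
        · exact Or.inl hq
        · exact Or.inr ⟨z, Or.inl rfl, hz⟩
        · exact Or.inr ⟨z', Or.inr hz', hrest⟩
      · rintro (hq | ⟨z', (rfl | hz'), hrest⟩)
        · exact Or.inl (Or.inl hq)
        · exact Or.inl (Or.inr hrest)
        · exact Or.inr ⟨z', hz', hrest⟩

-- ===== VERDICT (by name: the statement is the Claim_ definition above) =====
theorem rm_trans_closure_spec : Claim_equal_rm_trans_closure := by
  intro uni rs _
  unfold Spec_rm_trans_closure rm_trans_closure rm_trans_closure_alt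
  simp only []
  apply PySem.List.foldl_congr_mem
  intro acc e he
  rw [pv_cover_fold]
  have hcond : (true && !uni.any fun z => rs.contains (e.1, z) && rs.contains (z, e.2)) =
      !(PySem.Set.contains (uni.foldl (fun red z =>
        ((rs.filter (fun p => p.2 == z)).map (·.1)).foldl (fun red x =>
          ((rs.filter (fun p => p.1 == z)).map (·.2)).foldl (fun red y =>
            if rs.contains (x, y) then PySem.Set.add red (x, y) else red) red) red)
        PySem.Set.empty) e) := by
    rw [Bool.true_and]
    congr 1
    rw [Bool.eq_iff_iff]
    constructor
    · intro h
      obtain ⟨z, hz, hc⟩ := List.any_eq_true.mp h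
      have hc1 : (e.1, z) ∈ rs := by
        have := (Bool.and_eq_true_iff.mp hc).1
        simpa using this
      have hc2 : (z, e.2) ∈ rs := by
        have := (Bool.and_eq_true_iff.mp hc).2
        simpa using this
      exact (PySem.Set.contains_iff _ _).mpr
        ((pv_redundant_mem uni rs PySem.Set.empty e).mpr
          (Or.inr ⟨z, hz, hc1, hc2, he⟩))
    · intro h
      have := (pv_redundant_mem uni rs PySem.Set.empty e).mp ((PySem.Set.contains_iff _ _).mp h)
      rcases this with hq | ⟨z, hz, h1, h2, _⟩
      · simp [PySem.Set.empty] at hq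
      · exact List.any_eq_true.mpr ⟨z, hz, by simp [h1, h2]⟩
  rw [hcond]
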